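-- pv_equiv track=rewrite | github.com/ReethaElancheral/python | weekly test-18 -07-25/04_college_timetable/timetable/timetable_utils.py | generate_timetable
-- ===== SOURCE A (Python) =====
-- DAYS = ["Monday", "Tuesday", "Wednesday", "Thursday", "Friday"]
--
-- PERIODS = [1, 2, 3, 4, 5]
--
-- def generate_timetable(subjects):
--     timetable = {}
--     for day in DAYS:
--         used_subjects = set()
--         for period in PERIODS:
--             for subject in subjects:
--                 if subject not in used_subjects:
--                     timetable[(day, period)] = subject
--                     used_subjects.add(subject)
--                     break
--     return timetable
-- ===== SOURCE B (Python) =====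
-- DAYS = ["Monday", "Tuesday", "Wednesday", "Thursday", "Friday"]
--
-- PERIODS = [1, 2, 3, 4, 5]
--
-- def generate_timetable(subjects):
--     unique = list(dict.fromkeys(subjects))
--     timetable = {}
--     for day in DAYS:
--         for period in PERIODS:
--             if period - 1 < len(unique):
--                 timetable[(day, period)] = unique[period - 1]
--     return timetable
-- ===== Notes on version B (the rewrite author's own statement) =====
-- stated objective: simpler
-- what changed: B precomputes the distinct-subject list once (dict.fromkeys order) and assigns unique[period-1] by direct index in a flat day/period double loop, instead of A's per-day used-set with an inner scan-and-break over subjects for every period.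
import Mathlib
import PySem

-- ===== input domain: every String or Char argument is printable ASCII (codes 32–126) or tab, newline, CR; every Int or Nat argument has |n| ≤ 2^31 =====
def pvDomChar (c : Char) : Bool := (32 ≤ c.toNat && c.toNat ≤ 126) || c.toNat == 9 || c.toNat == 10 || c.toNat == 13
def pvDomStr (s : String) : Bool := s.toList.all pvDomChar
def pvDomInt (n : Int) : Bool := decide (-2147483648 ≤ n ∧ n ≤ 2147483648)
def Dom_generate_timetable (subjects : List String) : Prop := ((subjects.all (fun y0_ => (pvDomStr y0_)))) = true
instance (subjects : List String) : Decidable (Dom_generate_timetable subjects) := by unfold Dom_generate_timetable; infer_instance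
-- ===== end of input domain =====

-- B computes the distinct-subject list once (dict.fromkeys order) and indexes it by period,
-- replacing A's per-day set-tracked scan-and-break over subjects; same return value on all inputs.

def pvDAYS : List String := ["Monday", "Tuesday", "Wednesday", "Thursday", "Friday"]

def pvPERIODS : List Int := [1, 2, 3, 4, 5]

-- ===== PORT A =====
-- inner 'for subject in subjects: if subject not in used_subjects: … break'
def pvScanAssign (day : String) (period : Int) (subjects : List String)
    (st : PySem.Dict (String × Int) String × PySem.Set String) :
    PySem.Dict (String × Int) String × PySem.Set String :=
  match subjects with
  | [] => st
  | s :: rest =>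
      if s ∈ st.2 then pvScanAssign day period rest st
      else (st.1.insert (day, period) s, st.2.add s)

def generate_timetable (subjects : List String) : List (String × Int × String) :=
  let timetable : PySem.Dict (String × Int) String :=
    pvDAYS.foldl (fun tt day =>
      (pvPERIODS.foldl (fun st period => pvScanAssign day period subjects st)
        (tt, (PySem.Set.empty : PySem.Set String))).1) PySem.Dict.empty
  timetable.items.map (fun kv => (kv.1.1, kv.1.2, kv.2))

-- ===== PORT B =====
def generate_timetable_alt (subjects : List String) : List (String × Int × String) :=
  let unique : List String := PySem.List.dedup subjects
  let timetable : PySem.Dict (String × Int) String :=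
    pvDAYS.foldl (fun tt day =>
      pvPERIODS.foldl (fun tt period =>
        if period - 1 < (unique.length : Int) then
          tt.insert (day, period) (PySem.List.pyGetD unique (period - 1) "")
        else tt) tt) PySem.Dict.empty
  timetable.items.map (fun kv => (kv.1.1, kv.1.2, kv.2))

-- ===== PRECONDITION & SPEC =====
def Spec_generate_timetable (subjects : List String) (out : List (String × Int × String)) : Prop := out = generate_timetable_alt subjects
instance (subjects : List String) (out : List (String × Int × String)) : Decidable (Spec_generate_timetable subjects out) := by unfold Spec_generate_timetable; infer_instance

-- ===== CLAIM (what is proved, stated in full; the proofs are below) =====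
def Claim_equal_generate_timetable : Prop := ∀ (subjects : List String), Dom_generate_timetable subjects → Spec_generate_timetable subjects (generate_timetable subjects)

-- ===== LEMMAS AND PROOFS =====

-- the elements of xs not in `used`, first occurrences, in order (proof-side view of the used-set)
def pvRd (xs used : List String) : List String :=
  match xs with
  | [] => []
  | x :: rest => if x ∈ used then pvRd rest used else x :: pvRd rest (used ++ [x])

lemma pvScan_spec (day : String) (p : Int) :
    ∀ (xs used : List String) (d : PySem.Dict (String × Int) String),
    pvScanAssign day p xs (d, used) =
      match (pvRd xs used).head? with
      | some x => (d.insert (day, p) x, used ++ [x])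
      | none => (d, used)
  | [], used, d => by simp [pvScanAssign, pvRd]
  | x :: rest, used, d => by
      by_cases h : x ∈ used
      · simpa [pvScanAssign, pvRd, h] using pvScan_spec day p rest used d
      · simp [pvScanAssign, pvRd, h, PySem.Set.add]

lemma pvRd_tail : ∀ (xs used : List String) (x : String),
    (pvRd xs used).head? = some x → pvRd xs (used ++ [x]) = (pvRd xs used).tail
  | [], used, x => by simp [pvRd]
  | a :: rest, used, x => by
      by_cases h : a ∈ used
      · intro hh
        simp only [pvRd, if_pos h] at hh
        have h' : a ∈ used ++ [x] := List.mem_append_left _ h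
        simpa [pvRd, h, h'] using pvRd_tail rest used x hh
      · intro hh
        simp only [pvRd, if_neg h, List.head?_cons, Option.some.injEq] at hh
        subst hh
        simp [pvRd, h]

lemma pvFoldl_add_rd : ∀ (xs s : List String),
    List.foldl PySem.Set.add s xs = s ++ pvRd xs s
  | [], s => by simp [pvRd]
  | x :: rest, s => by
      by_cases h : x ∈ s
      · simpa [List.foldl, PySem.Set.add, h, pvRd] using pvFoldl_add_rd rest s
      · simpa [List.foldl, PySem.Set.add, h, pvRd] using pvFoldl_add_rd rest (s ++ [x])

lemma pvDedup_eq_rd (xs : List String) : PySem.List.dedup xs = pvRd xs [] := by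
  simpa [PySem.List.dedup, PySem.Set.ofList, PySem.Set.empty] using pvFoldl_add_rd xs []

-- one period of the day loop: A's scan-and-break performs exactly B's indexed assignment
lemma pvStep (xs : List String) (day : String) (j : ℕ) (p : Int) (hp : p = (j : Int) + 1)
    (d : PySem.Dict (String × Int) String) (used : List String)
    (h : pvRd xs used = (pvRd xs []).drop j) :
    ∃ used', pvScanAssign day p xs (d, used) =
        ((if p - 1 < ((pvRd xs []).length : Int) then
            d.insert (day, p) (PySem.List.pyGetD (pvRd xs []) (p - 1) "")
          else d), used')
      ∧ pvRd xs used' = (pvRd xs []).drop (j + 1) := by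
  have hp1 : p - 1 = (j : Int) := by omega
  rw [pvScan_spec day p xs used d, h, List.head?_drop]
  cases hx : (pvRd xs [])[j]? with
  | none =>
      have hlen : (pvRd xs []).length ≤ j := by
        simpa using List.getElem?_eq_none_iff.mp hx
      refine ⟨used, ?_, ?_⟩
      · rw [if_neg (by rw [hp1]; exact_mod_cast not_lt.mpr hlen)]
      · rw [h, List.drop_eq_nil_of_le hlen, List.drop_eq_nil_of_le (by omega)]
  | some x =>
      obtain ⟨hj, hxv⟩ := List.getElem?_eq_some_iff.mp hx
      refine ⟨used ++ [x], ?_, ?_⟩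
      · rw [if_pos (by rw [hp1]; exact_mod_cast hj), hp1]
        simp [PySem.List.pyGetD_natCast, hx]
      · have hh : (pvRd xs used).head? = some x := by
          rw [h, List.head?_drop, hx]
        rw [pvRd_tail xs used x hh, h, List.tail_drop]

-- one day of A's loop equals one day of B's loop
lemma pvDay (xs : List String) (day : String) (d : PySem.Dict (String × Int) String) :
    (pvPERIODS.foldl (fun st period => pvScanAssign day period xs st)
        (d, (PySem.Set.empty : PySem.Set String))).1
      = pvPERIODS.foldl (fun tt period =>
          if period - 1 < ((pvRd xs []).length : Int) then
            tt.insert (day, period) (PySem.List.pyGetD (pvRd xs []) (period - 1) "")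
          else tt) d := by
  obtain ⟨u1, e1, h1⟩ := pvStep xs day 0 1 (by norm_num) d [] (by simp)
  obtain ⟨u2, e2, h2⟩ := pvStep xs day 1 2 (by norm_num) _ u1 h1
  obtain ⟨u3, e3, h3⟩ := pvStep xs day 2 3 (by norm_num) _ u2 h2
  obtain ⟨u4, e4, h4⟩ := pvStep xs day 3 4 (by norm_num) _ u3 h3
  obtain ⟨u5, e5, h5⟩ := pvStep xs day 4 5 (by norm_num) _ u4 h4
  simp only [pvPERIODS, List.foldl, PySem.Set.empty]
  rw [e1, e2, e3, e4, e5]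

-- ===== VERDICT (by name: the statement is the Claim_ definition above) =====
theorem generate_timetable_spec : Claim_equal_generate_timetable := by
  intro subjects _
  unfold Spec_generate_timetable generate_timetable generate_timetable_alt
  rw [pvDedup_eq_rd]
  exact congrArg (fun t : PySem.Dict (String × Int) String => t.items.map (fun kv => (kv.1.1, kv.1.2, kv.2)))
    (List.foldl_ext _ _ PySem.Dict.empty (fun tt day _ => pvDay subjects day tt))
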